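-- pv_equiv track=rewrite | github.com/micheloosterhof/aldegonde | lp.py | decrypt_p_plus_c_times_c
-- ===== SOURCE A (Python) =====
-- N = 29  # GF(29)
--
-- EA = 0  # EA rune value (29 % 29 = 0), fallback for div-by-zero
--
-- def decrypt_p_plus_c_times_c(C: list[int], primer_c: int) -> list[int]:
--     """C(i) = P(i) + C(i-1)*C(i-2)  =>  P(i) = C(i) - C(i-1)*C(i-2)"""
--     P = []
--     prev_c2 = EA
--     prev_c1 = primer_c
--     for c in C:
--         p = (c - prev_c1 * prev_c2) % N
--         P.append(p)
--         prev_c2 = prev_c1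
--         prev_c1 = c
--     return P
-- ===== SOURCE B (Python) =====
-- N = 29  # GF(29)
--
--
-- def decrypt_p_plus_c_times_c(C: list[int], primer_c: int) -> list[int]:
--     """C(i) = P(i) + C(i-1)*C(i-2)  =>  P(i) = C(i) - C(i-1)*C(i-2)
--
--     No rolling state: the only outputs that depend on the primer/EA seed are
--     the first two, which are written as closed forms; from i >= 2 the answer
--     is a pure sliding window on C itself.
--     """
--     if not C:
--         return []
--     if len(C) == 1:
--         return [C[0] % N]
--     head = [C[0] % N, (C[1] - C[0] * primer_c) % N]
--     tail = [(z - y * x) % N for x, y, z in zip(C, C[1:], C[2:])]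
--     return head + tail
-- ===== Notes on version B (the rewrite author's own statement) =====
-- stated objective: alternative
-- what changed: Eliminates A's rolling (prev_c2, prev_c1) state seeded with (EA, primer): B emits the two seed-dependent outputs as explicit closed forms and computes everything else by a self-contained sliding window over C alone, never touching the primer or EA again.
import Mathlib
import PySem

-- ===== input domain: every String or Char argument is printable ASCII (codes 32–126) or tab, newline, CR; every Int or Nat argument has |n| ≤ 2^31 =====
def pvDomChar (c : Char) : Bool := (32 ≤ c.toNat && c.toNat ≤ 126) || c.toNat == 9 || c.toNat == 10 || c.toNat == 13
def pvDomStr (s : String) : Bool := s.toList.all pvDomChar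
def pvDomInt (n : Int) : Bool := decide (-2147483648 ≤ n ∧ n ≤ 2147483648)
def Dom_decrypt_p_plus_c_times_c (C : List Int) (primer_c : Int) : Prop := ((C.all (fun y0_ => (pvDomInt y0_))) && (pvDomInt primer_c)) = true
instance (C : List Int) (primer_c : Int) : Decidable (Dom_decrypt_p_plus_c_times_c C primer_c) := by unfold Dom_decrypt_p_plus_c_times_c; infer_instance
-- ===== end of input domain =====

-- B replaces A's seeded rolling state with closed-form first two outputs plus a seed-free sliding window over C (alternative decomposition, same cost).

-- ===== PORT A =====
def decrypt_p_plus_c_times_c (C : List Int) (primer_c : Int) : List Int :=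
  (C.foldl (fun (st : List Int × Int × Int) c =>
      (st.1 ++ [PySem.Int.mod (c - st.2.2 * st.2.1) 29], st.2.2, c))
    ([], 0, primer_c)).1

-- ===== PORT B =====
def decrypt_p_plus_c_times_c_alt (C : List Int) (primer_c : Int) : List Int :=
  match C with
  | [] => []
  | [c0] => [PySem.Int.mod c0 29]
  | c0 :: c1 :: rest =>
      let head := [PySem.Int.mod c0 29, PySem.Int.mod (c1 - c0 * primer_c) 29]
      let tail := ((c0 :: c1 :: rest).zip ((c1 :: rest).zip rest)).map
        (fun xyz => PySem.Int.mod (xyz.2.2 - xyz.2.1 * xyz.1) 29)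
      head ++ tail

-- ===== PRECONDITION & SPEC =====
def Spec_decrypt_p_plus_c_times_c (C : List Int) (primer_c : Int) (out : List Int) : Prop := out = decrypt_p_plus_c_times_c_alt C primer_c
instance (C : List Int) (primer_c : Int) (out : List Int) : Decidable (Spec_decrypt_p_plus_c_times_c C primer_c out) := by unfold Spec_decrypt_p_plus_c_times_c; infer_instance

-- ===== CLAIM (what is proved, stated in full; the proofs are below) =====
def Claim_equal_decrypt_p_plus_c_times_c : Prop := ∀ (C : List Int) (primer_c : Int), Dom_decrypt_p_plus_c_times_c C primer_c → Spec_decrypt_p_plus_c_times_c C primer_c (decrypt_p_plus_c_times_c C primer_c)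

-- ===== LEMMAS AND PROOFS =====
theorem fold_eq_zip (C : List Int) : ∀ (a b : Int) (acc : List Int),
    (C.foldl (fun (st : List Int × Int × Int) c =>
        (st.1 ++ [PySem.Int.mod (c - st.2.2 * st.2.1) 29], st.2.2, c)) (acc, a, b)).1
    = acc ++ ((a :: b :: C).zip ((b :: C).zip C)).map
        (fun abc => PySem.Int.mod (abc.2.2 - abc.2.1 * abc.1) 29) := by
  induction C with
  | nil => intro a b acc; simp [List.foldl]
  | cons c cs ih =>
      intro a b acc
      simp only [List.foldl, List.zip_cons_cons, List.map_cons]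
      rw [ih]
      simp

-- ===== VERDICT (by name: the statement is the Claim_ definition above) =====
theorem decrypt_p_plus_c_times_c_spec : Claim_equal_decrypt_p_plus_c_times_c := by
  intro C primer_c _
  unfold Spec_decrypt_p_plus_c_times_c decrypt_p_plus_c_times_c
  rw [fold_eq_zip]
  match C with
  | [] => simp [decrypt_p_plus_c_times_c_alt]
  | [c0] => simp [decrypt_p_plus_c_times_c_alt, mul_comm]
  | c0 :: c1 :: rest =>
      simp [decrypt_p_plus_c_times_c_alt, mul_comm]
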